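-- pv_equiv track=rewrite | github.com/mshah21202/eye-guard | utils.py | sa_format
-- ===== SOURCE A (Python) =====
-- def sa_format(strings: list[str]):
--     '''
--     Returns a list of potential KSA formatted plate numbers
--     '''
--     identifiers = ["KSA", "ksa", "السعودية"]
--
--     number_strings = list(filter(lambda string: any(char.isdigit() for char in string) and string.isascii(), strings))
--     char_strings = list(filter(lambda string: any(not char.isdigit() and char != '+' for char in string) and string.isascii(), strings))
--
--     numbers = ""
--     chars = ""
--
--     if len(number_strings) > 1:
--         numbers = "".join(number_strings)
--     else:
--         numbers = number_strings[0]
--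
--     new_char_strings = []
--     # Remove Identifiers
--     for string in char_strings:
--         if string in identifiers:
--             continue
--
--         new_char_strings.append(string)
--
--     if len(new_char_strings) > 1:
--         chars = "".join(new_char_strings)
--     else:
--         chars = new_char_strings[0]
--
--     result_temp = chars + numbers
--
--     return [result_temp]
-- ===== SOURCE B (Python) =====
-- def sa_format(strings: list[str]):
--     '''
--     Returns a list of potential KSA formatted plate numbers
--     '''
--     identifiers = {"KSA", "ksa", "السعودية"}
--
--     # Single pass accumulating the two result strings directly (first element starts
--     # the accumulator, later ones are concatenated): no intermediate lists and no
--     # join-vs-[0] branching; an empty bucket leaves None and the final concatenation fails.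
--     chars = None
--     numbers = None
--     for s in strings:
--         if not s.isascii():
--             continue
--         if any(c.isdigit() for c in s):
--             numbers = s if numbers is None else numbers + s
--         if s not in identifiers and any(c not in "0123456789+" for c in s):
--             chars = s if chars is None else chars + s
--     return [chars + numbers]
-- ===== Notes on version B (the rewrite author's own statement) =====
-- stated objective: simpler
-- what changed: B accumulates the two output strings directly in one first-vs-rest pass (string concatenation per element, set membership for identifiers, a char-class test per character) instead of A's staged pipeline of two filtered lists, an identifier-removal loop, and join-vs-[0] branching; joining a singleton equals taking its element, so the branch disappears.
import Mathlib
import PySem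

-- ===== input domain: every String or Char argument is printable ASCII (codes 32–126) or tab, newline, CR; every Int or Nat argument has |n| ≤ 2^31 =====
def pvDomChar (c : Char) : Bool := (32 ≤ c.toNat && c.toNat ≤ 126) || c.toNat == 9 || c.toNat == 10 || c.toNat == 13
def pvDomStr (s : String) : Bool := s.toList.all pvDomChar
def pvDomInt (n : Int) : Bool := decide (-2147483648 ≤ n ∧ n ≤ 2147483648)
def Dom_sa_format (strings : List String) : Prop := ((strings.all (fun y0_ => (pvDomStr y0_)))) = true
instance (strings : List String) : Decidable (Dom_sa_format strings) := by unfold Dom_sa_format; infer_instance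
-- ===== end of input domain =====

-- B accumulates the two output strings directly in one pass (no intermediate lists, no
-- join-vs-[0] branching) instead of A's staged filter/filter/remove/join pipeline (simpler).
-- Pre_ excludes the inputs on which Python A raises IndexError (an empty digit bucket or
-- an empty non-identifier char bucket); B raises there too (TypeError on None).


-- shared one-liners: the Python expressions both versions write out
-- string.isascii(): every char has code < 128 (exact)
def pvAscii (s : String) : Bool := s.toList.all (fun c => decide (c.toNat < 128))
-- any(char.isdigit() for char in string): Char.isDigit is exact on the ASCII domain
def pvHasDigit (s : String) : Bool := s.toList.any (fun c => c.isDigit)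

-- ===== PORT A =====
def pvIdentifiers : List String := ["KSA", "ksa", "السعودية"]
-- any(not char.isdigit() and char != '+' for char in string)
def pvHasCharish (s : String) : Bool := s.toList.any (fun c => !c.isDigit && c ≠ '+')

def sa_format (strings : List String) : List String :=
  let number_strings := strings.filter (fun s => pvHasDigit s && pvAscii s)
  let char_strings := strings.filter (fun s => pvHasCharish s && pvAscii s)
  -- number_strings[0] / new_char_strings[0]: IndexError (none) excluded by Pre_; default "" only outside Pre_
  let numbers := if number_strings.length > 1 then PySem.Str.join "" number_strings
                 else PySem.List.pyGetD number_strings 0 ""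
  let new_char_strings := char_strings.foldl
      (fun acc s => if pvIdentifiers.contains s then acc else acc ++ [s]) []
  let chars := if new_char_strings.length > 1 then PySem.Str.join "" new_char_strings
               else PySem.List.pyGetD new_char_strings 0 ""
  [chars ++ numbers]

-- ===== PORT B =====
-- identifiers = {"KSA", "ksa", "السعودية"} — a Python set; membership only, order never used
def pvIdentSet : PySem.Set String := PySem.Set.ofList ["KSA", "ksa", "السعودية"]
-- any(c not in "0123456789+" for c in s)
def pvHasNonClass (s : String) : Bool := s.toList.any (fun c => !("0123456789+".toList.contains c))

-- numbers = s if numbers is None else numbers + s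
def pvAcc (o : Option String) (s : String) : Option String :=
  match o with
  | none => some s
  | some a => some (a ++ s)

def sa_format_alt (strings : List String) : List String :=
  -- for s in strings: continue on non-ascii; accumulate into the two Option buckets
  let p := strings.foldl
    (fun (p : Option String × Option String) s =>
      if !pvAscii s then p
      else
        let numbers := if pvHasDigit s then pvAcc p.2 s else p.2
        let chars := if !(s ∈ pvIdentSet) && pvHasNonClass s then pvAcc p.1 s else p.1
        (chars, numbers)) (none, none)
  -- chars + numbers: TypeError (raise) if a bucket is still None — excluded by Pre_;
  -- the default [""] is reached only outside Pre_
  match p with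
  | (some c, some n) => [c ++ n]
  | _ => [""]

-- ===== PRECONDITION & SPEC =====
-- Pre_ admits exactly the inputs on which Python A returns: at least one ascii string with a
-- digit, and at least one ascii non-identifier string with a non-digit non-'+' char;
-- on the rest A raises IndexError.
def Pre_sa_format (strings : List String) : Prop :=
  (strings.any (fun s => pvHasDigit s && pvAscii s)) = true ∧
  (strings.any (fun s => pvHasCharish s && pvAscii s && !pvIdentifiers.contains s)) = true
instance (strings : List String) : Decidable (Pre_sa_format strings) := by
  unfold Pre_sa_format; infer_instance
def pvWitness_sa_format : List String := ["ABC", "123"]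
def Spec_sa_format (strings : List String) (out : List String) : Prop := out = sa_format_alt strings
instance (strings : List String) (out : List String) : Decidable (Spec_sa_format strings out) := by
  unfold Spec_sa_format; infer_instance

-- ===== CLAIM (what is proved, stated in full; the proofs are below) =====
def Claim_equal_sa_format : Prop :=
  ∀ (strings : List String), Dom_sa_format strings → Pre_sa_format strings →
    Spec_sa_format strings (sa_format strings)

-- ===== LEMMAS AND PROOFS =====

-- proof-only helper: concatenation of a list of strings
def pvConcat (l : List String) : String := l.foldl (· ++ ·) ""

theorem pvConcat_foldl (l : List String) (a : String) : l.foldl (· ++ ·) a = a ++ pvConcat l := by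
  induction l generalizing a with
  | nil => simp [pvConcat]
  | cons x t ih =>
    simp only [pvConcat, List.foldl_cons, String.empty_append]
    simp only [pvConcat] at ih
    rw [ih (a ++ x), ih x, String.append_assoc]

theorem pvConcat_cons (x : String) (t : List String) : pvConcat (x :: t) = x ++ pvConcat t := by
  have := pvConcat_foldl t x
  simp only [pvConcat, List.foldl_cons, String.empty_append]
  simpa [pvConcat] using this

theorem pvConcat_toList (l : List String) : (pvConcat l).toList = (l.map String.toList).flatten := by
  induction l with
  | nil => simp [pvConcat]
  | cons x t ih => rw [pvConcat_cons]; simp [ih]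

theorem pv_chars_join_nilsep (parts : List (List Char)) :
    PySem.Chars.join [] parts = parts.flatten := by
  induction parts with
  | nil => rfl
  | cons p rest ih =>
    cases rest with
    | nil => simp [PySem.Chars.join_singleton]
    | cons q u => rw [PySem.Chars.join_cons_cons, ih]; simp

theorem pv_join_empty (l : List String) : PySem.Str.join "" l = pvConcat l := by
  rw [← String.toList_inj, PySem.Str.toList_join, pvConcat_toList]
  have h : ("" : String).toList = [] := rfl
  rw [h, pv_chars_join_nilsep]

-- A's join-vs-[0] branch on a nonempty list is plain concatenation
theorem pvA_pick (l : List String) (h : l ≠ []) :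
    (if l.length > 1 then PySem.Str.join "" l else PySem.List.pyGetD l 0 "") = pvConcat l := by
  match l, h with
  | [x], _ =>
    rw [pvConcat_cons]
    simp [PySem.List.pyGetD_zero_cons, pvConcat]
  | x :: y :: t, _ => simp [pv_join_empty]

-- c ∈ "0123456789+"  ⟺  c is a decimal digit or '+'
theorem pv_digit_cases (c : Char) (hd : c.isDigit = true) :
    c = '0' ∨ c = '1' ∨ c = '2' ∨ c = '3' ∨ c = '4' ∨ c = '5' ∨ c = '6' ∨ c = '7' ∨ c = '8' ∨ c = '9' := by
  simp only [Char.isDigit, Bool.and_eq_true, decide_eq_true_eq] at hd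
  obtain ⟨h1, h2⟩ := hd
  rw [ge_iff_le, UInt32.le_iff_toNat_le] at h1
  rw [UInt32.le_iff_toNat_le] at h2
  have h0 : ('0' : Char).val.toNat = 48 := by decide
  have h9 : ('9' : Char).val.toNat = 57 := by decide
  rw [h0] at h1; rw [h9] at h2
  have hofn : Char.ofNat c.val.toNat = c := Char.ofNat_toNat c
  interval_cases h : c.val.toNat <;> rw [← hofn] <;> decide

theorem pv_charclass (c : Char) :
    ("0123456789+".toList.contains c) = (c.isDigit || c = '+') := by
  have h : "0123456789+".toList = ['0','1','2','3','4','5','6','7','8','9','+'] := rfl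
  rw [h]
  simp only [List.contains_eq_mem, List.mem_cons, List.not_mem_nil, or_false]
  rw [Bool.eq_iff_iff]
  simp only [decide_eq_true_eq, Bool.or_eq_true]
  constructor
  · rintro (rfl|rfl|rfl|rfl|rfl|rfl|rfl|rfl|rfl|rfl|rfl) <;> simp [Char.isDigit]
  · rintro (hd | rfl)
    · have := pv_digit_cases c hd
      tauto
    · tauto

-- B's element test for the char bucket equals A's
theorem pv_hasNonClass_eq (s : String) : pvHasNonClass s = pvHasCharish s := by
  unfold pvHasNonClass pvHasCharish
  refine List.any_congr rfl (fun c => ?_)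
  rw [pv_charclass]
  by_cases hd : c.isDigit <;> by_cases hp : c = '+' <;> simp [hd, hp]

-- membership in the identifier set is list membership
theorem pv_identSet_mem (s : String) : (decide (s ∈ pvIdentSet)) = pvIdentifiers.contains s := by
  by_cases h : s ∈ pvIdentSet
  · have : s ∈ pvIdentifiers := by
      simpa [pvIdentSet, pvIdentifiers, PySem.Set.mem_ofList] using h
    simp [h, this]
  · have : s ∉ pvIdentifiers := by
      intro hm
      exact h (by simpa [pvIdentSet, pvIdentifiers, PySem.Set.mem_ofList] using hm)
    simp [h, this]

-- B's single fold builds the concatenations of A's two filtered lists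
-- what a first-vs-rest accumulator holds after absorbing a further list of strings
def pvExt (o : Option String) (l : List String) : Option String :=
  match o with
  | none => if l.isEmpty then none else some (pvConcat l)
  | some a => some (a ++ pvConcat l)

theorem pvExt_nil (o : Option String) : pvExt o [] = o := by
  cases o <;> simp [pvExt, pvConcat]

theorem pvExt_cons (o : Option String) (x : String) (l : List String) :
    pvExt o (x :: l) = pvExt (pvAcc o x) l := by
  cases o with
  | none =>
    cases l with
    | nil => simp [pvExt, pvAcc, pvConcat]
    | cons y u => simp [pvExt, pvAcc, pvConcat_cons]
  | some a => simp [pvExt, pvAcc, pvConcat_cons, String.append_assoc]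

theorem pvExt_none_of_ne_nil (l : List String) (h : l ≠ []) :
    pvExt none l = some (pvConcat l) := by
  cases l with
  | nil => exact absurd rfl h
  | cons x u => simp [pvExt]

-- B's single fold builds A's two buckets (as first-vs-rest accumulators)
theorem pv_foldB (l : List String) (oc on : Option String) :
    (l.foldl
      (fun (p : Option String × Option String) s =>
        if !pvAscii s then p
        else
          let numbers := if pvHasDigit s then pvAcc p.2 s else p.2
          let chars := if !(s ∈ pvIdentSet) && pvHasNonClass s then pvAcc p.1 s else p.1
          (chars, numbers)) (oc, on))
    = (pvExt oc (l.filter (fun s => pvHasCharish s && pvAscii s && !pvIdentifiers.contains s)),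
       pvExt on (l.filter (fun s => pvHasDigit s && pvAscii s))) := by
  induction l generalizing oc on with
  | nil => simp [pvExt_nil]
  | cons x t ih =>
    rw [List.foldl_cons]
    by_cases ha : pvAscii x
    · rw [if_neg (by simp [ha])]
      simp only [ih]
      by_cases hd : pvHasDigit x <;> by_cases hch : pvHasCharish x <;>
        by_cases hc : x ∈ pvIdentifiers <;>
        simp [ha, hd, hch, hc, pv_identSet_mem, pv_hasNonClass_eq, pvExt_cons]
    · rw [if_pos (by simp [ha])]
      rw [ih]
      simp [ha]

-- A's identifier-removal loop is a filter
theorem pv_fold_remove (l : List String) (acc : List String) :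
    l.foldl (fun acc s => if pvIdentifiers.contains s then acc else acc ++ [s]) acc
    = acc ++ l.filter (fun s => !pvIdentifiers.contains s) := by
  induction l generalizing acc with
  | nil => simp
  | cons x t ih =>
    rw [List.foldl_cons, List.filter_cons]
    by_cases hi : pvIdentifiers.contains x
    · rw [if_pos hi, ih]; simp; simpa using hi
    · rw [if_neg hi, ih]; simp; simpa using hi

-- ===== VERDICT (by name: the statement is the Claim_ definition above) =====
theorem sa_format_spec : Claim_equal_sa_format := by
  intro strings _ hp
  show sa_format strings = sa_format_alt strings
  obtain ⟨h1, h2⟩ := hp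
  have hnum_ne : strings.filter (fun s => pvHasDigit s && pvAscii s) ≠ [] := by
    rw [List.any_eq_true] at h1
    obtain ⟨x, hx, hpx⟩ := h1
    intro hnil
    rw [List.filter_eq_nil_iff] at hnil
    exact absurd hpx (by simpa using hnil x hx)
  have hch_ne : strings.filter
      (fun s => pvHasCharish s && pvAscii s && !pvIdentifiers.contains s) ≠ [] := by
    rw [List.any_eq_true] at h2
    obtain ⟨x, hx, hpx⟩ := h2
    intro hnil
    rw [List.filter_eq_nil_iff] at hnil
    exact absurd hpx (by simpa using hnil x hx)
  have hfilt : List.filter (fun s => !pvIdentifiers.contains s)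
        (List.filter (fun s => pvHasCharish s && pvAscii s) strings)
      = List.filter (fun s => pvHasCharish s && pvAscii s && !pvIdentifiers.contains s) strings := by
    rw [List.filter_filter]
    apply List.filter_congr
    intro s _
    by_cases hc : pvHasCharish s <;> by_cases ha : pvAscii s <;> simp [hc, ha]
  simp only [sa_format, sa_format_alt, pv_fold_remove, List.nil_append, hfilt, pv_foldB]
  rw [pvExt_none_of_ne_nil _ hch_ne, pvExt_none_of_ne_nil _ hnum_ne,
      pvA_pick _ hnum_ne, pvA_pick _ hch_ne]
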